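-- pv_equiv track=rewrite | github.com/mohammadfaiizan/ProjectI | DSA/Problem/Trie/03_Autocomplete_Dictionary_Systems/Basic_Autocomplete.py | approach3_trie_based
-- ===== SOURCE A (Python) =====
-- from typing import List, Dict, Set, Optional, Tuple
--
-- class TrieNode:
--     """Basic trie node for autocomplete"""
--     def __init__(self):
--         self.children = {}
--         self.is_end = False
--         self.word = ""
--         self.frequency = 0
--
-- def approach3_trie_based(dictionary: List[str], prefix: str, max_suggestions: int = 5) -> List[str]:
--     """
--     Approach 3: Trie-based Autocomplete
--
--     Build trie and traverse to find suggestions.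
--
--     Time: O(sum of word lengths) for build + O(prefix_length + k) for query
--     Space: O(sum of word lengths)
--     """
--     # Build trie
--     root = TrieNode()
--
--     for word in dictionary:
--         node = root
--         for char in word:
--             if char not in node.children:
--                 node.children[char] = TrieNode()
--             node = node.children[char]
--         node.is_end = True
--         node.word = word
--
--     # Navigate to prefix node
--     node = root
--     for char in prefix:
--         if char not in node.children:
--             return []  # Prefix not found
--         node = node.children[char]
--
--     # Collect suggestions using DFS
--     suggestions = []
--
--     def dfs(current_node: TrieNode):
--         if len(suggestions) >= max_suggestions:
--             return
--
--         if current_node.is_end: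
--             suggestions.append(current_node.word)
--
--         # Traverse children in alphabetical order
--         for char in sorted(current_node.children.keys()):
--             dfs(current_node.children[char])
--
--     dfs(node)
--     return suggestions
-- ===== SOURCE B (Python) =====
-- import bisect
--
-- def approach3_trie_based(dictionary, prefix, max_suggestions=5):
--     """Sorted-unique word list + binary search: locate the band of words >= prefix
--     with bisect_left, then walk forward collecting words while they start with the
--     prefix, up to max_suggestions."""
--     words = sorted(set(dictionary))
--     out = []
--     i = bisect.bisect_left(words, prefix)
--     while i < len(words) and len(out) < max_suggestions and words[i].startswith(prefix):
--         out.append(words[i])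
--         i += 1
--     return out
-- ===== Notes on version B (the rewrite author's own statement) =====
-- stated objective: faster
-- what changed: Replaces the character-trie build and recursive DFS collection with one sorted(set(dictionary)) pass plus a bisect_left binary search that jumps to the contiguous band of words >= prefix and walks it until max_suggestions or the prefix band ends.
import Mathlib
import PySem

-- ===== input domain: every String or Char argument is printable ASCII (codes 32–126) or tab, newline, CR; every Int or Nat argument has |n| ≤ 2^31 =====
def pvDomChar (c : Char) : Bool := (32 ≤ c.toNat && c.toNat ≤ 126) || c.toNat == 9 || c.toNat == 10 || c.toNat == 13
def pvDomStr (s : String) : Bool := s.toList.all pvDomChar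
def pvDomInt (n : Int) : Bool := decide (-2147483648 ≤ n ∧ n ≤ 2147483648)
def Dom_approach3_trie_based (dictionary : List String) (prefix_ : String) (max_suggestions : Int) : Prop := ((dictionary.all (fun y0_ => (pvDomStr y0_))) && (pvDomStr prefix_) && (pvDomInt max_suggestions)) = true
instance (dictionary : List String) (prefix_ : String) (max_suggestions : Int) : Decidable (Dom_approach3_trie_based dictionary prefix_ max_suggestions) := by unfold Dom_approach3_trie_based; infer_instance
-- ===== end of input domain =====

-- B replaces the trie build + DFS by one sorted-unique word list and a bisect_left
-- binary search to the band of words ≥ prefix, walked forward up to max_suggestions.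

-- ===== PORT A =====
-- The trie is encoded flat (a nested inductive is not allowed): childA maps a node's
-- path to the list of its children's characters in insertion order (= node.children's
-- keys), endA maps a node's path to its (is_end, word) fields (absent = defaults
-- (false, "")).  Every step of A's code is mirrored on this encoding.

/-- one step of `for char in word: ...` of A's build loop: state is (children map, current path) -/
def pvStepA (acc : PySem.Dict (List Char) (List Char) × List Char) (c : Char) :
    PySem.Dict (List Char) (List Char) × List Char :=
  let kids := acc.1.getD acc.2 []
  let d := if c ∈ kids then acc.1 else acc.1.insert acc.2 (kids ++ [c])
  (d, acc.2 ++ [c])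

/-- insert one word: run the char loop, then set is_end/word at the final node -/
def pvInsertA (childA : PySem.Dict (List Char) (List Char))
    (endA : PySem.Dict (List Char) (Bool × String)) (w : String) :
    PySem.Dict (List Char) (List Char) × PySem.Dict (List Char) (Bool × String) :=
  let r := w.toList.foldl pvStepA (childA, [])
  (r.1, endA.insert r.2 (true, w))

/-- `for word in dictionary: ...` -/
def pvBuildA (dictionary : List String) :
    PySem.Dict (List Char) (List Char) × PySem.Dict (List Char) (Bool × String) :=
  dictionary.foldl (fun st w => pvInsertA st.1 st.2 w) (PySem.Dict.empty, PySem.Dict.empty)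

/-- `for char in prefix: ...` navigation; none = `return []` -/
def pvNavA (childA : PySem.Dict (List Char) (List Char)) (path : List Char) :
    List Char → Option (List Char)
  | [] => some path
  | c :: cs =>
    if c ∈ childA.getD path [] then pvNavA childA (path ++ [c]) cs else none

/-- the recursive `dfs`; `fuel` only makes the recursion structural (A's trie is finite) -/
def pvDfsA (childA : PySem.Dict (List Char) (List Char))
    (endA : PySem.Dict (List Char) (Bool × String)) (maxS : Int) :
    Nat → List Char → List String → List String
  | 0, _, sugg => sugg
  | fuel + 1, path, sugg =>
    if (sugg.length : Int) ≥ maxS then sugg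
    else
      let pr := endA.getD path (false, "")
      let sugg1 := if pr.1 then sugg ++ [pr.2] else sugg
      (PySem.List.sorted (childA.getD path []) (fun c => c)).foldl
        (fun s c => pvDfsA childA endA maxS fuel (path ++ [c]) s) sugg1

def approach3_trie_based (dictionary : List String) (prefix_ : String) (max_suggestions : Int) : List String :=
  let st := pvBuildA dictionary
  match pvNavA st.1 [] prefix_.toList with
  | none => []
  | some p =>
      pvDfsA st.1 st.2 max_suggestions ((dictionary.map (fun w => w.toList.length)).sum + 1) p []

-- ===== PORT B =====
/-- the `while` loop: walk forward from index i collecting matches -/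
def pvWalkB (words : List String) (prefix_ : String) (maxS : Int) (i : Nat) (out : List String) : List String :=
  match h : words[i]? with
  | none => out
  | some w =>
    if (out.length : Int) < maxS ∧ PySem.Str.startswith w prefix_ = true then
      pvWalkB words prefix_ maxS (i + 1) (out ++ [w])
    else out
termination_by words.length - i
decreasing_by
  have : i < words.length := by
    by_contra hh
    rw [List.getElem?_eq_none (by omega)] at h
    simp at h
  omega

def approach3_trie_based_alt (dictionary : List String) (prefix_ : String) (max_suggestions : Int) : List String :=
  let words := PySem.List.sorted (PySem.Set.ofList dictionary) (fun w => w)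
  pvWalkB words prefix_ max_suggestions (PySem.List.bisectLeft words prefix_) []

-- ===== PRECONDITION & SPEC =====
def Spec_approach3_trie_based (dictionary : List String) (prefix_ : String) (max_suggestions : Int) (out : List String) : Prop := out = approach3_trie_based_alt dictionary prefix_ max_suggestions
instance (dictionary : List String) (prefix_ : String) (max_suggestions : Int) (out : List String) : Decidable (Spec_approach3_trie_based dictionary prefix_ max_suggestions out) := by unfold Spec_approach3_trie_based; infer_instance

-- ===== CLAIM (what is proved, stated in full; the proofs are below) =====
def Claim_equal_approach3_trie_based : Prop := ∀ (dictionary : List String) (prefix_ : String) (max_suggestions : Int), Dom_approach3_trie_based dictionary prefix_ max_suggestions → Spec_approach3_trie_based dictionary prefix_ max_suggestions (approach3_trie_based dictionary prefix_ max_suggestions)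

-- ===== LEMMAS AND PROOFS =====

theorem pvLtLex (u v : List Char) : u < v ↔ List.Lex (· < ·) u v := Iff.rfl

theorem pvBisectLoop_spec {α : Type} [LinearOrder α] (xs : List α) (x : α)
    (hs : xs.Pairwise (· ≤ ·)) :
    ∀ (fuel lo hi : Nat), lo ≤ hi → hi ≤ xs.length → hi - lo ≤ fuel →
    (∀ j (hj : j < xs.length), j < lo → xs[j] < x) →
    (∀ j (hj : j < xs.length), hi ≤ j → x ≤ xs[j]) →
    (∀ j (hj : j < xs.length), j < PySem.List.bisectLeftLoop xs x fuel lo hi → xs[j] < x) ∧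
    (∀ j (hj : j < xs.length), PySem.List.bisectLeftLoop xs x fuel lo hi ≤ j → x ≤ xs[j]) ∧
    PySem.List.bisectLeftLoop xs x fuel lo hi ≤ xs.length := by
  intro fuel
  induction fuel with
  | zero =>
    intro lo hi h1 h2 h3 hlo hhi
    have : lo = hi := by omega
    subst this
    exact ⟨hlo, hhi, by simpa [PySem.List.bisectLeftLoop] using h2⟩
  | succ f ih =>
    intro lo hi h1 h2 h3 hlo hhi
    by_cases hlh : lo < hi
    · have hmid : (lo + hi) / 2 < xs.length := by omega
      have hget : xs[(lo + hi) / 2]? = some xs[(lo + hi) / 2] := List.getElem?_eq_getElem hmid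
      have hmono : ∀ (i j : Nat) (hi' : i < xs.length) (hj' : j < xs.length), i ≤ j → xs[i] ≤ xs[j] := by
        intro i j hi' hj' hij
        rcases Nat.lt_or_ge i j with h | h
        · exact (List.pairwise_iff_getElem.mp hs) i j hi' hj' h
        · have : i = j := by omega
          subst this; exact le_refl _
      by_cases hcmp : xs[(lo + hi) / 2] < x
      · have hrec := ih ((lo + hi) / 2 + 1) hi (by omega) h2 (by omega)
          (by
            intro j hj hjlt
            calc xs[j] ≤ xs[(lo + hi) / 2] := hmono _ _ hj hmid (by omega)
              _ < x := hcmp) hhi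
        simpa [PySem.List.bisectLeftLoop, hlh, hget, hcmp] using hrec
      · have hrec := ih lo ((lo + hi) / 2) (by omega) (by omega) (by omega) hlo
          (by
            intro j hj hjge
            calc x ≤ xs[(lo + hi) / 2] := le_of_not_gt hcmp
              _ ≤ xs[j] := hmono _ _ hmid hj hjge)
        simpa [PySem.List.bisectLeftLoop, hlh, hget, hcmp] using hrec
    · have : lo = hi := by omega
      subst this
      have hval : PySem.List.bisectLeftLoop xs x (f + 1) lo lo = lo := by
        simp [PySem.List.bisectLeftLoop]
      rw [hval]
      exact ⟨hlo, hhi, h2⟩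

def pvCanon (dictionary : List String) (prefix_ : String) (max_suggestions : Int) : List String :=
  ((PySem.List.sorted (PySem.Set.ofList dictionary) (fun w => w)).filter
      (fun w => PySem.Chars.startswith w.toList prefix_.toList)).take max_suggestions.toNat

theorem pvNotAppendLt (p t : List Char) : ¬ (p ++ t < p) := by
  rw [pvLtLex]
  induction p with
  | nil => intro h; cases h
  | cons a p ih =>
    intro h
    cases h with
    | cons h' => exact ih h'
    | rel h' => exact lt_irrefl _ h'

theorem pvPrefixLe (p w : List Char) (h : p <+: w) : ¬ (w < p) := by
  obtain ⟨t, rfl⟩ := h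
  exact pvNotAppendLt p t

/-- strings with a given prefix form an interval: if u is ≥ p but does not start
with p, then every v starting with p is < u -/
theorem pvBandLt (p : List Char) : ∀ (u v : List Char), ¬ (u < p) → ¬ (p <+: u) → p <+: v → v < u := by
  induction p with
  | nil => intro u v _ hnp _; exact absurd (List.nil_prefix) hnp
  | cons a p ih =>
    intro u v hle hnp hpv
    match u with
    | [] => exact absurd (by rw [pvLtLex]; exact List.Lex.nil) hle
    | b :: u' =>
      obtain ⟨t, rfl⟩ := hpv
      have hba : ¬ (b < a) := by
        intro hba
        exact hle (by rw [pvLtLex]; exact List.Lex.rel hba)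
      rcases lt_or_eq_of_le (le_of_not_gt hba) with hab | hab
      · rw [pvLtLex]
        exact List.Lex.rel hab
      · subst hab
        have hle' : ¬ (u' < p) := by
          intro h'
          exact hle (by rw [pvLtLex] at h' ⊢; exact List.Lex.cons h')
        have hnp' : ¬ (p <+: u') := by
          intro h'
          exact hnp ((List.prefix_cons_inj a).mpr h')
        have := ih u' (p ++ t) hle' hnp' (List.prefix_append p t)
        rw [pvLtLex] at this ⊢
        exact List.Lex.cons this

/-- the while loop collects: out ++ (matching words among the remaining suffix), truncated -/
theorem pvWalk_eq (ws : List String) (prefix_ : String) (maxS : Int)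
    (hs : ws.Pairwise (· < ·)) :
    ∀ i out, (∀ j (hj : j < ws.length), i ≤ j → ¬ (ws[j] < prefix_)) →
    pvWalkB ws prefix_ maxS i out =
      out ++ ((ws.drop i).filter
          (fun w => PySem.Chars.startswith w.toList prefix_.toList)).take (maxS - out.length).toNat := by
  intro i
  induction hn : ws.length - i using Nat.strong_induction_on generalizing i with
  | _ n ih =>
  intro out hband
  rw [pvWalkB]
  split
  next hw =>
    have hlen : ws.length ≤ i := by
      by_contra hh
      rw [List.getElem?_eq_getElem (by omega)] at hw
      simp at hw
    rw [List.drop_eq_nil_of_le hlen]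
    simp
  next w hw =>
    have hilt : i < ws.length := by
      by_contra hh
      rw [List.getElem?_eq_none (by omega)] at hw
      simp at hw
    have hwi : ws[i] = w := by
      rw [List.getElem?_eq_getElem hilt] at hw
      exact Option.some_injective _ hw
    have hdrop : ws.drop i = w :: ws.drop (i + 1) := by
      rw [← hwi]
      exact (List.getElem_cons_drop hilt).symm
    by_cases hlt : (out.length : Int) < maxS
    · by_cases hsw : PySem.Str.startswith w prefix_ = true
      · rw [if_pos ⟨hlt, hsw⟩]
        rw [ih (ws.length - (i+1)) (by omega) (i+1) rfl (out ++ [w]) (fun j hj hij => hband j hj (by omega))]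
        rw [hdrop]
        have hsw' : PySem.Chars.startswith w.toList prefix_.toList = true := by
          rwa [PySem.Str.startswith_eq] at hsw
        simp only [List.filter_cons, hsw', if_true]
        have htk : (maxS - out.length).toNat = ((maxS - (out.length + 1)).toNat) + 1 := by omega
        rw [htk, List.take_succ_cons]
        simp
      · rw [if_neg (by rintro ⟨_, h⟩; exact hsw h)]
        rw [Bool.not_eq_true] at hsw
        rw [PySem.Str.startswith_eq] at hsw
        have hnu : ¬ ((ws[i]'hilt).toList < prefix_.toList) := by
          intro h'
          exact hband i hilt (le_refl _) (String.lt_iff_toList_lt.mpr h')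
        have hnpu : ¬ (prefix_.toList <+: (ws[i]'hilt).toList) := by
          rw [← PySem.Chars.startswith_iff, hwi, hsw]
          simp
        have hfail : ∀ j (hj : j < ws.length), i ≤ j →
            PySem.Chars.startswith (ws[j]).toList prefix_.toList = false := by
          intro j hj hij
          by_cases hji : j = i
          · subst hji; rw [hwi, hsw]
          · rw [Bool.eq_false_iff]
            intro hh
            have hpv : prefix_.toList <+: (ws[j]'hj).toList :=
              (PySem.Chars.startswith_iff _ _).mp hh
            have hvu := pvBandLt prefix_.toList (ws[i]'hilt).toList (ws[j]'hj).toList hnu hnpu hpv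
            have hlt2 : (ws[j]'hj) < (ws[i]'hilt) := String.lt_iff_toList_lt.mpr hvu
            have hlt3 : (ws[i]'hilt) < (ws[j]'hj) :=
              (List.pairwise_iff_getElem.mp hs) i j hilt hj (by omega)
            exact absurd hlt2 (not_lt_of_gt hlt3)
        have hnil : (ws.drop i).filter
            (fun w => PySem.Chars.startswith w.toList prefix_.toList) = [] := by
          rw [List.filter_eq_nil_iff]
          intro v hv
          obtain ⟨k, hk, hkv⟩ := List.mem_iff_getElem.mp hv
          have hk' : k < ws.length - i := by simpa using hk
          have : v = ws[i + k]'(by omega) := by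
            rw [← hkv]; exact (List.getElem_drop ..)
          subst this
          rw [hfail (i + k) (by omega) (by omega)]
          simp
        rw [hnil]
        simp
    · rw [if_neg (by rintro ⟨h, _⟩; exact hlt h)]
      have : (maxS - out.length).toNat = 0 := by omega
      rw [this]
      simp


/-- a proper prefix is lexicographically smaller -/
theorem pvProperPrefixLt (p u : List Char) (h : p <+: u) (hne : p ≠ u) : p < u := by
  rw [pvLtLex]
  induction p generalizing u with
  | nil =>
    match u with
    | [] => exact absurd rfl hne
    | c :: u' => exact List.Lex.nil
  | cons a p ih =>
    match u with
    | [] => exact absurd (List.prefix_nil.mp h) hne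
    | b :: u' =>
      obtain ⟨t, ht⟩ := h
      rw [List.cons_append] at ht
      injection ht with hab htail
      subst hab
      exact List.Lex.cons (ih u' ⟨t, htail⟩ (fun hc => hne (by rw [hc])))

/-- two words extending the same path with different next characters compare by those characters -/
theorem pvCharOrderLt (p : List Char) (c1 c2 : Char) (x y : List Char)
    (h1 : p ++ [c1] <+: x) (h2 : p ++ [c2] <+: y) (hc : c1 < c2) : x < y := by
  rw [pvLtLex]
  induction p generalizing x y with
  | nil =>
    obtain ⟨t1, ht1⟩ := h1
    obtain ⟨t2, ht2⟩ := h2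
    simp at ht1 ht2
    rw [← ht1, ← ht2]
    exact List.Lex.rel hc
  | cons a p ih =>
    obtain ⟨t1, ht1⟩ := h1
    obtain ⟨t2, ht2⟩ := h2
    rw [← ht1, ← ht2]
    simp only [List.cons_append]
    exact List.Lex.cons (ih (p ++ [c1] ++ t1) (p ++ [c2] ++ t2) (List.prefix_append _ _) (List.prefix_append _ _))

/-- splitting a filter over a strictly sorted list by an ordered disjunction of predicates -/
theorem pvFilterSplit {α : Type} [LinearOrder α] (l : List α) (hs : l.Pairwise (· < ·))
    (q q1 q2 : α → Bool)
    (hiff : ∀ x ∈ l, q x = (q1 x || q2 x))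
    (hord : ∀ x y, q1 x = true → q2 y = true → x < y) :
    l.filter q = l.filter q1 ++ l.filter q2 := by
  induction l with
  | nil => simp
  | cons a t ih =>
    have hst : t.Pairwise (· < ·) := hs.of_cons
    have ihs := ih hst (fun x hx => hiff x (List.mem_cons_of_mem a hx))
    rw [List.filter_cons, List.filter_cons, List.filter_cons]
    by_cases h1 : q1 a = true
    · have hq : q a = true := by rw [hiff a (List.mem_cons_self ..), h1]; simp
      have h2f : q2 a = false := by
        by_contra hh
        rw [Bool.not_eq_false] at hh
        exact absurd (hord a a h1 hh) (lt_irrefl a)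
      rw [hq, if_pos rfl, if_pos h1, h2f, if_neg (by simp), ihs]
      simp
    · by_cases h2 : q2 a = true
      · have hq : q a = true := by rw [hiff a (List.mem_cons_self ..), h2]; simp
        have hnil : t.filter q1 = [] := by
          rw [List.filter_eq_nil_iff]
          intro x hx hq1
          have hxa : a < x := (List.pairwise_cons.mp hs).1 x hx
          have : x < a := hord x a hq1 h2
          exact absurd hxa (not_lt_of_gt this)
        rw [hq, if_pos rfl, if_neg h1, if_pos h2, ihs, hnil]
        simp
      · have e1 : q1 a = false := Bool.eq_false_iff.mpr h1
        have e2 : q2 a = false := Bool.eq_false_iff.mpr h2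
        have hq : q a = false := by rw [hiff a (List.mem_cons_self ..), e1, e2]; rfl
        rw [hq, if_neg (by simp), if_neg h1, if_neg h2]
        exact ihs

/-- children list at a node -/
def pvKids (d : PySem.Dict (List Char) (List Char)) (p : List Char) : List Char := d.getD p []

/-- effect of the char loop of one word insertion -/
theorem pvStepA_foldl (cs : List Char) : ∀ (d : PySem.Dict (List Char) (List Char)) (q : List Char),
    (cs.foldl pvStepA (d, q)).2 = q ++ cs ∧
    (∀ p c, c ∈ pvKids (cs.foldl pvStepA (d, q)).1 p ↔
      c ∈ pvKids d p ∨ ∃ j, ∃ _ : j < cs.length, p = q ++ cs.take j ∧ c = cs[j]) ∧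
    ((∀ p, (pvKids d p).Nodup) → ∀ p, (pvKids (cs.foldl pvStepA (d, q)).1 p).Nodup) := by
  induction cs with
  | nil => intro d q; refine ⟨by simp, by simp, fun h => h⟩
  | cons c0 cs ih =>
    intro d q
    rw [List.foldl_cons]
    have hstep : pvStepA (d, q) c0 =
        ((if c0 ∈ pvKids d q then d else d.insert q (pvKids d q ++ [c0])), q ++ [c0]) := rfl
    rw [hstep]
    set d' := if c0 ∈ pvKids d q then d else d.insert q (pvKids d q ++ [c0]) with hd'
    have hkids' : ∀ p c, c ∈ pvKids d' p ↔ c ∈ pvKids d p ∨ (p = q ∧ c = c0) := by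
      intro p c
      rw [hd']
      by_cases hmem : c0 ∈ pvKids d q
      · rw [if_pos hmem]
        constructor
        · exact fun h => Or.inl h
        · rintro (h | ⟨rfl, rfl⟩)
          · exact h
          · exact hmem
      · rw [if_neg hmem]
        unfold pvKids
        rw [PySem.Dict.getD_insert]
        by_cases hpq : p = q
        · subst hpq
          rw [if_pos rfl]
          simp
        · rw [if_neg hpq]
          simp [hpq]
    have hnod' : (∀ p, (pvKids d p).Nodup) → ∀ p, (pvKids d' p).Nodup := by
      intro h p
      rw [hd']
      by_cases hmem : c0 ∈ pvKids d q
      · rw [if_pos hmem]; exact h p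
      · rw [if_neg hmem]
        unfold pvKids
        rw [PySem.Dict.getD_insert]
        by_cases hpq : p = q
        · subst hpq
          rw [if_pos rfl]
          exact List.Nodup.append (h p) (List.nodup_singleton c0) (by simpa using hmem)
        · rw [if_neg hpq]; exact h p
    obtain ⟨ih1, ih2, ih3⟩ := ih d' (q ++ [c0])
    refine ⟨by rw [ih1]; simp, ?_, fun h => ih3 (hnod' h)⟩
    intro p c
    rw [ih2 p c]
    constructor
    · rintro (h | ⟨j, hj, rfl, rfl⟩)
      · rw [hkids' p c] at h
        rcases h with h | ⟨rfl, rfl⟩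
        · exact Or.inl h
        · exact Or.inr ⟨0, by simp, by simp⟩
      · exact Or.inr ⟨j + 1, by simpa using hj, by simp⟩
    · rintro (h | ⟨j, hj, rfl, rfl⟩)
      · exact Or.inl ((hkids' p c).mpr (Or.inl h))
      · match j with
        | 0 => exact Or.inl ((hkids' _ _).mpr (Or.inr ⟨by simp, rfl⟩))
        | j + 1 =>
          refine Or.inr ⟨j, by simpa using hj, by simp, rfl⟩

/-- edges laid down by inserting a word are exactly the (path, next char) pairs of its prefixes -/
theorem pvEdgePrefix (cs p : List Char) (c : Char) :
    (∃ j, ∃ _ : j < cs.length, p = cs.take j ∧ c = cs[j]) ↔ p ++ [c] <+: cs := by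
  constructor
  · rintro ⟨j, hj, rfl, rfl⟩
    rw [List.take_append_getElem hj]
    exact List.take_prefix _ _
  · rintro ⟨t, ht⟩
    have hlen : p.length + 1 + t.length = cs.length := by
      have := congrArg List.length ht
      simp at this
      omega
    refine ⟨p.length, by omega, ?_, ?_⟩
    · rw [← ht]
      rw [List.append_assoc]
      rw [List.take_left']
      rfl
    · subst ht
      simp

/-- invariant of A's trie build -/
theorem pvBuildA_inv (l : List String) :
    (∀ p, (pvKids (pvBuildA l).1 p).Nodup) ∧
    (∀ p c, c ∈ pvKids (pvBuildA l).1 p ↔ ∃ w ∈ l, p ++ [c] <+: w.toList) ∧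
    (∀ p, (pvBuildA l).2.get? p =
      if ∃ w ∈ l, w.toList = p then some (true, String.ofList p) else none) := by
  induction l using List.reverseRecOn with
  | nil =>
    refine ⟨?_, ?_, ?_⟩
    · intro p; simp [pvBuildA, pvKids, PySem.Dict.getD_empty]
    · intro p c; simp [pvBuildA, pvKids, PySem.Dict.getD_empty]
    · intro p; simp [pvBuildA, PySem.Dict.get?_empty]
  | append_singleton l w ih =>
    obtain ⟨ih1, ih2, ih3⟩ := ih
    have hstep : pvBuildA (l ++ [w]) = pvInsertA (pvBuildA l).1 (pvBuildA l).2 w := by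
      unfold pvBuildA
      rw [List.foldl_append]
      rfl
    obtain ⟨hf1, hf2, hf3⟩ := pvStepA_foldl w.toList (pvBuildA l).1 []
    refine ⟨?_, ?_, ?_⟩
    · intro p
      rw [hstep]
      exact hf3 ih1 p
    · intro p c
      rw [hstep]
      show c ∈ pvKids (w.toList.foldl pvStepA ((pvBuildA l).1, [])).1 p ↔ _
      rw [hf2 p c]
      simp only [List.nil_append] at *
      rw [ih2 p c, pvEdgePrefix]
      constructor
      · rintro (⟨w', hw', hp⟩ | hp)
        · exact ⟨w', List.mem_append_left _ hw', hp⟩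
        · exact ⟨w, List.mem_append_right _ (List.mem_singleton_self w), hp⟩
      · rintro ⟨w', hw', hp⟩
        rcases List.mem_append.mp hw' with h | h
        · exact Or.inl ⟨w', h, hp⟩
        · rw [List.mem_singleton.mp h] at hp
          exact Or.inr hp
    · intro p
      rw [hstep]
      show ((pvBuildA l).2.insert (w.toList.foldl pvStepA ((pvBuildA l).1, [])).2 (true, w)).get? p = _
      rw [hf1]
      simp only [List.nil_append]
      rw [PySem.Dict.get?_insert]
      by_cases hpw : p = w.toList
      · rw [if_pos hpw]
        have hex : ∃ w' ∈ l ++ [w], w'.toList = p := ⟨w, List.mem_append_right _ (List.mem_singleton_self w), hpw.symm⟩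
        rw [if_pos hex]
        subst hpw
        rw [String.ofList_toList]
      · rw [if_neg hpw, ih3 p]
        by_cases hex : ∃ w' ∈ l, w'.toList = p
        · rw [if_pos hex, if_pos (by obtain ⟨w', h1, h2⟩ := hex; exact ⟨w', List.mem_append_left _ h1, h2⟩)]
        · rw [if_neg hex, if_neg ?_]
          rintro ⟨w', hw', hp⟩
          rcases List.mem_append.mp hw' with h | h
          · exact hex ⟨w', h, hp⟩
          · rw [List.mem_singleton.mp h] at hp
            exact hpw hp.symm

/-- the sorted distinct words of the dictionary extending a path -/
def pvE (dictionary : List String) (p : List Char) : List String :=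
  (PySem.List.sorted (PySem.Set.ofList dictionary) (fun w => w)).filter
    (fun w => decide (p <+: w.toList))

theorem pvMemWs (dictionary : List String) (w : String) :
    w ∈ PySem.List.sorted (PySem.Set.ofList dictionary) (fun w => w) ↔ w ∈ dictionary := by
  rw [PySem.List.mem_sorted, PySem.Set.mem_ofList]

theorem pvE_nil (dictionary : List String) (p : List Char)
    (h : ∀ w ∈ dictionary, ¬ p <+: w.toList) : pvE dictionary p = [] := by
  unfold pvE
  rw [List.filter_eq_nil_iff]
  intro w hw
  simp only [decide_eq_true_eq]
  exact h w ((pvMemWs dictionary w).mp hw)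

theorem pvE_qset (dictionary : List String) (p : List Char) (cs : List Char)
    (hcs : cs.Pairwise (· < ·)) :
    (PySem.List.sorted (PySem.Set.ofList dictionary) (fun w => w)).filter
        (fun w => decide (∃ c ∈ cs, p ++ [c] <+: w.toList)) =
      cs.flatMap (fun c => pvE dictionary (p ++ [c])) := by
  induction cs with
  | nil => simp
  | cons c0 cs ih =>
    rw [List.flatMap_cons, ← ih hcs.of_cons]
    rw [pvFilterSplit _ (PySem.List.sorted_ofList_pairwise_lt dictionary)
      _ (fun w => decide (p ++ [c0] <+: w.toList))
      (fun w => decide (∃ c ∈ cs, p ++ [c] <+: w.toList))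
      (by
        intro x _
        rw [Bool.eq_iff_iff]
        simp)
      (by
        intro x y h1 h2
        rw [decide_eq_true_eq] at h1 h2
        obtain ⟨c, hc, hcy⟩ := h2
        have hlt : c0 < c := (List.pairwise_cons.mp hcs).1 c hc
        exact String.lt_iff_toList_lt.mpr (pvCharOrderLt p c0 c _ _ h1 hcy hlt))]
    rfl

theorem pvE_decomp (dictionary : List String) (p : List Char) (sc : List Char)
    (hsc : sc.Pairwise (· < ·))
    (hmem : ∀ c, c ∈ sc ↔ ∃ w ∈ dictionary, p ++ [c] <+: w.toList) :
    pvE dictionary p =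
      (if ∃ w ∈ dictionary, w.toList = p then [String.ofList p] else []) ++
        sc.flatMap (fun c => pvE dictionary (p ++ [c])) := by
  rw [← pvE_qset dictionary p sc hsc]
  unfold pvE
  rw [pvFilterSplit _ (PySem.List.sorted_ofList_pairwise_lt dictionary)
    _ (fun w => decide (w.toList = p))
    (fun w => decide (∃ c ∈ sc, p ++ [c] <+: w.toList))
    ?_ ?_]
  · congr 1
    by_cases hex : ∃ w ∈ dictionary, w.toList = p
    · rw [if_pos hex]
      obtain ⟨w0, hw0, hw0p⟩ := hex
      have hw0e : w0 = String.ofList p := by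
        rw [← hw0p, String.ofList_toList]
      have hmemws : String.ofList p ∈ PySem.List.sorted (PySem.Set.ofList dictionary) (fun w => w) := by
        rw [pvMemWs]
        rw [← hw0e]
        exact hw0
      have hnd : (PySem.List.sorted (PySem.Set.ofList dictionary) (fun w => w)).Nodup :=
        (PySem.List.sorted_perm _ _ _).nodup_iff.mpr (PySem.Set.nodup_ofList dictionary)
      rw [List.filter_congr (q := fun w => w == String.ofList p) ?_]
      · rw [List.filter_beq, List.count_eq_one_of_mem hnd hmemws]
        rfl
      · intro x _
        rw [Bool.eq_iff_iff]
        simp only [decide_eq_true_eq, beq_iff_eq]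
        constructor
        · intro h; rw [← h, String.ofList_toList]
        · intro h; rw [h]; simp
    · rw [if_neg hex, List.filter_eq_nil_iff]
      intro w hw
      simp only [decide_eq_true_eq]
      intro hc
      exact hex ⟨w, (pvMemWs dictionary w).mp hw, hc⟩
  · intro x hx
    rw [Bool.eq_iff_iff]
    simp only [decide_eq_true_eq, Bool.or_eq_true]
    constructor
    · intro hpre
      by_cases heq : x.toList = p
      · exact Or.inl heq
      · obtain ⟨t, ht⟩ := hpre
        match t with
        | [] => exact absurd (by rw [← ht]; simp) heq
        | c :: t' =>
          refine Or.inr ⟨c, ?_, ⟨t', by rw [← ht]; simp⟩⟩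
          rw [hmem c]
          exact ⟨x, (pvMemWs dictionary x).mp hx, ⟨t', by rw [← ht]; simp⟩⟩
    · rintro (heq | ⟨c, _, hc⟩)
      · rw [heq]
      · exact (List.prefix_append p [c]).trans hc
  · intro x y h1 h2
    rw [decide_eq_true_eq] at h1 h2
    obtain ⟨c, _, hcy⟩ := h2
    refine String.lt_iff_toList_lt.mpr (pvProperPrefixLt _ _ ?_ ?_)
    · rw [h1]
      exact (List.prefix_append p [c]).trans hcy
    · rw [h1]
      intro hcon
      have hlen := congrArg List.length hcon
      have hlen2 := List.IsPrefix.length_le hcy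
      simp at hlen hlen2
      omega

/-- the DFS from a node collects, in order, the matching words below it, truncated -/
theorem pvDfsA_eq (dictionary : List String) (maxS : Int) :
    ∀ (fuel : Nat) (p : List Char) (sugg : List String),
      (∀ w ∈ dictionary, w.toList.length < fuel + p.length) →
      pvDfsA (pvBuildA dictionary).1 (pvBuildA dictionary).2 maxS fuel p sugg =
        sugg ++ (pvE dictionary p).take (maxS - sugg.length).toNat := by
  obtain ⟨hinv1, hinv2, hinv3⟩ := pvBuildA_inv dictionary
  intro fuel
  induction fuel with
  | zero =>
    intro p sugg hdd
    have hE : pvE dictionary p = [] := by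
      apply pvE_nil
      intro w hw hpre
      have h1 := hdd w hw
      have h2 := List.IsPrefix.length_le hpre
      omega
    rw [hE]
    simp [pvDfsA]
  | succ f ih =>
    intro p sugg hd
    rw [pvDfsA]
    by_cases hfull : (sugg.length : Int) ≥ maxS
    · rw [if_pos hfull]
      have h0 : (maxS - sugg.length).toNat = 0 := by omega
      rw [h0]
      simp
    · rw [if_neg hfull]
      have hfold : ∀ (cs : List Char) (sugg' : List String),
          cs.foldl (fun s c => pvDfsA (pvBuildA dictionary).1 (pvBuildA dictionary).2 maxS f (p ++ [c]) s) sugg' =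
            sugg' ++ (cs.flatMap (fun c => pvE dictionary (p ++ [c]))).take (maxS - sugg'.length).toNat := by
        intro cs
        induction cs with
        | nil => simp
        | cons c cs ihc =>
          intro sugg'
          rw [List.foldl_cons,
            ih (p ++ [c]) sugg' (by intro w hw; have := hd w hw; simp only [List.length_append, List.length_cons, List.length_nil]; omega),
            ihc, List.flatMap_cons, List.take_append, List.append_assoc]
          congr 2
          have hlt : ((sugg' ++ (pvE dictionary (p ++ [c])).take (maxS - ↑sugg'.length).toNat).length : Int)
              = sugg'.length + min (maxS - ↑sugg'.length).toNat (pvE dictionary (p ++ [c])).length := by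
            simp
          congr 1
          simp only [List.length_append, List.length_take]
          omega
      set sc := PySem.List.sorted (pvKids (pvBuildA dictionary).1 p) (fun c => c) with hsc
      have hscnd : sc.Nodup := (PySem.List.sorted_perm _ _ _).nodup_iff.mpr (hinv1 p)
      have hscle : sc.Pairwise (· ≤ ·) := PySem.List.sorted_pairwise _ _
      have hsclt : sc.Pairwise (· < ·) := by
        have := List.Pairwise.and hscle hscnd
        exact this.imp (fun ⟨hle, hne⟩ => lt_of_le_of_ne hle hne)
      have hscmem : ∀ c, c ∈ sc ↔ ∃ w ∈ dictionary, p ++ [c] <+: w.toList := by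
        intro c
        rw [hsc, PySem.List.mem_sorted]
        exact hinv2 p c
      have hdec := pvE_decomp dictionary p sc hsclt hscmem
      by_cases hword : ∃ w ∈ dictionary, w.toList = p
      · have hget : (pvBuildA dictionary).2.getD p (false, "") = (true, String.ofList p) := by
          rw [PySem.Dict.getD_eq_get?_getD, hinv3 p, if_pos hword]
          rfl
        rw [hget]
        show (PySem.List.sorted (pvKids (pvBuildA dictionary).1 p) (fun c => c)).foldl _ (sugg ++ [String.ofList p]) = _
        rw [← hsc, hfold sc (sugg ++ [String.ofList p]), hdec, if_pos hword]
        have hn : (maxS - sugg.length).toNat = ((maxS - (sugg.length + 1)).toNat) + 1 := by omega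
        rw [hn, List.singleton_append, List.take_succ_cons]
        simp only [List.length_append, List.length_cons, List.length_nil, List.append_assoc,
          List.cons_append, List.nil_append]
        congr 3
      · have hget : (pvBuildA dictionary).2.getD p (false, "") = (false, "") := by
          rw [PySem.Dict.getD_eq_get?_getD, hinv3 p, if_neg hword]
          rfl
        rw [hget]
        show (PySem.List.sorted (pvKids (pvBuildA dictionary).1 p) (fun c => c)).foldl _ sugg = _
        rw [← hsc, hfold sc sugg, hdec, if_neg hword, List.nil_append]

theorem pvNavA_val (childA : PySem.Dict (List Char) (List Char)) :
    ∀ (cs q r : List Char), pvNavA childA q cs = some r → r = q ++ cs := by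
  intro cs
  induction cs with
  | nil => intro q r h; simp [pvNavA] at h; simp [h.symm]
  | cons c cs ih =>
    intro q r h
    rw [pvNavA] at h
    by_cases hm : c ∈ childA.getD q []
    · rw [if_pos hm] at h
      rw [ih (q ++ [c]) r h]
      simp
    · rw [if_neg hm] at h
      exact absurd h (by simp)

theorem pvNavA_none (dictionary : List String) :
    ∀ (cs q : List Char), pvNavA (pvBuildA dictionary).1 q cs = none →
      ∀ w ∈ dictionary, ¬ (q ++ cs <+: w.toList) := by
  obtain ⟨hinv1, hinv2, hinv3⟩ := pvBuildA_inv dictionary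
  intro cs
  induction cs with
  | nil => intro q h; simp [pvNavA] at h
  | cons c cs ih =>
    intro q h w hw hpre
    rw [pvNavA] at h
    by_cases hm : c ∈ (pvBuildA dictionary).1.getD q []
    · rw [if_pos hm] at h
      exact ih (q ++ [c]) h w hw (by simpa using hpre)
    · have : c ∈ pvKids (pvBuildA dictionary).1 q := by
        rw [hinv2 q c]
        refine ⟨w, hw, ?_⟩
        refine List.IsPrefix.trans ?_ hpre
        refine ⟨cs, by simp⟩
      exact hm this

theorem pvA_eq_canon (dictionary : List String) (prefix_ : String) (max_suggestions : Int) :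
    approach3_trie_based dictionary prefix_ max_suggestions =
      pvCanon dictionary prefix_ max_suggestions := by
  unfold pvCanon
  have hfilt : (PySem.List.sorted (PySem.Set.ofList dictionary) (fun w => w)).filter
        (fun w => PySem.Chars.startswith w.toList prefix_.toList) = pvE dictionary prefix_.toList := by
    unfold pvE
    apply List.filter_congr
    intro x _
    rw [Bool.eq_iff_iff, PySem.Chars.startswith_iff]
    simp
  rw [hfilt]
  have hA : approach3_trie_based dictionary prefix_ max_suggestions =
      match pvNavA (pvBuildA dictionary).1 [] prefix_.toList with
      | none => ([] : List String)
      | some p => pvDfsA (pvBuildA dictionary).1 (pvBuildA dictionary).2 max_suggestions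
          ((dictionary.map (fun w => w.toList.length)).sum + 1) p [] := rfl
  rw [hA]
  cases hnav : pvNavA (pvBuildA dictionary).1 [] prefix_.toList with
  | none =>
    have hnil : pvE dictionary prefix_.toList = [] := by
      apply pvE_nil
      intro w hw hpre
      exact pvNavA_none dictionary prefix_.toList [] hnav w hw (by simpa using hpre)
    rw [hnil]
    simp
  | some p =>
    have hp : p = prefix_.toList := by
      have := pvNavA_val (pvBuildA dictionary).1 prefix_.toList [] p hnav
      simpa using this
    subst hp
    simp only []
    rw [pvDfsA_eq dictionary max_suggestions _ _ []]
    · simp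
    · intro w hw
      have hle : w.toList.length ≤ (dictionary.map (fun w => w.toList.length)).sum :=
        List.single_le_sum (fun x _ => Nat.zero_le x) _ (List.mem_map_of_mem hw)
      omega

theorem pvB_eq_canon (dictionary : List String) (prefix_ : String) (max_suggestions : Int) :
    approach3_trie_based_alt dictionary prefix_ max_suggestions = pvCanon dictionary prefix_ max_suggestions := by
  unfold approach3_trie_based_alt pvCanon
  set ws := PySem.List.sorted (PySem.Set.ofList dictionary) (fun w => w) with hws
  show pvWalkB ws prefix_ max_suggestions (PySem.List.bisectLeft ws prefix_) [] =
    ((ws.filter (fun w => PySem.Chars.startswith w.toList prefix_.toList)).take max_suggestions.toNat)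
  have hslt : ws.Pairwise (· < ·) := PySem.List.sorted_ofList_pairwise_lt dictionary
  have hsle : ws.Pairwise (· ≤ ·) := hslt.imp (fun h => le_of_lt h)
  have hspec := pvBisectLoop_spec ws prefix_ hsle ws.length 0 ws.length
    (Nat.zero_le _) (le_refl _) (by omega)
    (by intro j hj hjl; omega)
    (by intro j hj hjl; omega)
  have hbl : PySem.List.bisectLeft ws prefix_ = PySem.List.bisectLeftLoop ws prefix_ ws.length 0 ws.length := rfl
  obtain ⟨hlt, hge, hle⟩ := hspec
  rw [← hbl] at hlt hge hle
  set i0 := PySem.List.bisectLeft ws prefix_ with hi0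
  rw [pvWalk_eq ws prefix_ max_suggestions hslt i0 []
    (by intro j hj hij; exact not_lt_of_ge (hge j hj hij))]
  rw [List.nil_append]
  have hsplit : ws.filter (fun w => PySem.Chars.startswith w.toList prefix_.toList)
      = (ws.drop i0).filter (fun w => PySem.Chars.startswith w.toList prefix_.toList) := by
    conv_lhs => rw [← List.take_append_drop i0 ws]
    rw [List.filter_append]
    have : (ws.take i0).filter (fun w => PySem.Chars.startswith w.toList prefix_.toList) = [] := by
      rw [List.filter_eq_nil_iff]
      intro v hv
      obtain ⟨k, hk, hkv⟩ := List.mem_iff_getElem.mp hv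
      have hk1 : k < i0 := by
        have := List.length_take_le i0 ws
        have : k < min i0 ws.length := by simpa using hk
        omega
      have hk2 : k < ws.length := by
        have : k < min i0 ws.length := by simpa using hk
        omega
      have hv2 : v = ws[k]'hk2 := by rw [← hkv]; exact List.getElem_take
      subst hv2
      have hvlt : (ws[k]'hk2) < prefix_ := hlt k hk2 hk1
      intro hc
      have hpw : prefix_.toList <+: (ws[k]'hk2).toList := (PySem.Chars.startswith_iff _ _).mp hc
      exact pvPrefixLe _ _ hpw (String.lt_iff_toList_lt.mp hvlt)
    rw [this, List.nil_append]
  rw [hsplit]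
  simp

-- ===== VERDICT (by name: the statement is the Claim_ definition above) =====
theorem approach3_trie_based_spec : Claim_equal_approach3_trie_based := by
  intro dictionary prefix_ max_suggestions _
  unfold Spec_approach3_trie_based
  rw [pvA_eq_canon, pvB_eq_canon]
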